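-- pv_equiv track=rewrite | github.com/elink21/greedy1and2 | greedyWeb/visualMap/views.py | searchForBestOption
-- ===== SOURCE A (Python) =====
-- from typing import List
--
-- def searchForBestOption(actualIndex: int, row: List, alreadyVisited: List, distanceMatrix) -> int:
--     # Searching lineally for a shorter distance with no inner loops
--     nextToVisit = -1
--     actualBestDistance = 999999
--     for x in range(len(row)):
--         # So distance is shorter
--         if row[x] < actualBestDistance:
--             # Now lets look if the node wasnt visited yet, so no inner loop is created:
--             if not x in alreadyVisited and row[x] != 0:
--                 nextToVisit = x
--                 actualBestDistance = row[x]
--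
--     return nextToVisit
-- ===== SOURCE B (Python) =====
-- from typing import List
--
-- def searchForBestOption(actualIndex: int, row: List, alreadyVisited: List, distanceMatrix) -> int:
--     # build-candidates-then-stable-sort: smallest distance wins, ties -> smallest index
--     cand = [x for x in range(len(row))
--             if row[x] < 999999 and x not in alreadyVisited and row[x] != 0]
--     cand.sort(key=lambda x: row[x])
--     return cand[0] if cand else -1
-- ===== Notes on version B (the rewrite author's own statement) =====
-- stated objective: alternative
-- what changed: Replaced the fused single-pass running-minimum loop (two state variables, 999999 ceiling) by building the candidate-index list with a filter, stable-sorting it by distance, and returning its head (or -1 if empty).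
import Mathlib
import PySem

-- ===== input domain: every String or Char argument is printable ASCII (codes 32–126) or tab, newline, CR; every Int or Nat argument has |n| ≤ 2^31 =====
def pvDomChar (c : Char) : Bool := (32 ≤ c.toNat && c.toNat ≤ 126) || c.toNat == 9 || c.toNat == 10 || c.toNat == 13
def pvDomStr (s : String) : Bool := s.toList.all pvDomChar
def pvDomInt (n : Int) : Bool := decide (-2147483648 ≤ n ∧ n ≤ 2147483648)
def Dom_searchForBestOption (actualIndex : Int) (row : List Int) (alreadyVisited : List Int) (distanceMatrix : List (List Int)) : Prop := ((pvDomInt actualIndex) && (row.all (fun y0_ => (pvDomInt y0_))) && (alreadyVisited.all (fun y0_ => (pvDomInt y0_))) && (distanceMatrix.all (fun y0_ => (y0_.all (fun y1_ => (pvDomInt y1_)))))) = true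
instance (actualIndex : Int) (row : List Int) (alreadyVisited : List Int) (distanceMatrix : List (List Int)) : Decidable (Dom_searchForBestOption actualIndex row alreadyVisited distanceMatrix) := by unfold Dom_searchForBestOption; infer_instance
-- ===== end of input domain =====

-- B builds the candidate list, stable-sorts it by distance and takes the head — an
-- alternative decomposition of A's fused running-minimum loop (same result, not faster).

-- ===== PORT A =====
def searchForBestOption (actualIndex : Int) (row : List Int) (alreadyVisited : List Int) (distanceMatrix : List (List Int)) : Int :=
  ((PySem.List.pyRange 0 (PySem.List.len row) 1).foldl
    (fun (s : Int × Int) x =>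
      if PySem.List.pyGetD row x 0 < s.2 then
        if ¬ (alreadyVisited.contains x) ∧ PySem.List.pyGetD row x 0 ≠ 0 then
          (x, PySem.List.pyGetD row x 0)
        else s
      else s)
    (-1, 999999)).1

-- ===== PORT B =====
def searchForBestOption_alt (actualIndex : Int) (row : List Int) (alreadyVisited : List Int) (distanceMatrix : List (List Int)) : Int :=
  match PySem.List.sorted
      ((PySem.List.pyRange 0 (PySem.List.len row) 1).filter
        (fun x => decide (PySem.List.pyGetD row x 0 < 999999) &&
                  !(alreadyVisited.contains x) &&
                  decide (PySem.List.pyGetD row x 0 ≠ 0)))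
      (fun x => PySem.List.pyGetD row x 0) with
  | [] => -1
  | h :: _ => h

-- ===== PRECONDITION & SPEC =====
def Spec_searchForBestOption (actualIndex : Int) (row : List Int) (alreadyVisited : List Int) (distanceMatrix : List (List Int)) (out : Int) : Prop := out = searchForBestOption_alt actualIndex row alreadyVisited distanceMatrix
instance (actualIndex : Int) (row : List Int) (alreadyVisited : List Int) (distanceMatrix : List (List Int)) (out : Int) : Decidable (Spec_searchForBestOption actualIndex row alreadyVisited distanceMatrix out) := by unfold Spec_searchForBestOption; infer_instance

-- ===== CLAIM (what is proved, stated in full; the proofs are below) =====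
def Claim_equal_searchForBestOption : Prop := ∀ (actualIndex : Int) (row : List Int) (alreadyVisited : List Int) (distanceMatrix : List (List Int)), Dom_searchForBestOption actualIndex row alreadyVisited distanceMatrix → Spec_searchForBestOption actualIndex row alreadyVisited distanceMatrix (searchForBestOption actualIndex row alreadyVisited distanceMatrix)

-- ===== LEMMAS AND PROOFS =====

-- A's loop over any index list, with current best ≤ 999999, equals the strict-min
-- selection step over the filtered candidate list.
theorem foldA_eq_foldl_filter (key : Int → Int) (vis : List Int) :
    ∀ (l : List Int) (v b : Int), b ≤ 999999 →
    l.foldl (fun (s : Int × Int) x =>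
        if key x < s.2 then
          if ¬ (vis.contains x) ∧ key x ≠ 0 then (x, key x) else s
        else s) (v, b)
    = (l.filter (fun x => decide (key x < 999999) && !(vis.contains x) && decide (key x ≠ 0))).foldl
        (fun (s : Int × Int) y => if key y < s.2 then (y, key y) else s) (v, b) := by
  intro l
  induction l with
  | nil => intro v b _; rfl
  | cons x t ih =>
    intro v b hb
    by_cases hq : (decide (key x < 999999) && !(vis.contains x) && decide (key x ≠ 0)) = true
    · simp only [List.foldl_cons, List.filter_cons, if_pos hq]
      simp only [Bool.and_eq_true, decide_eq_true_eq, Bool.not_eq_true'] at hq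
      by_cases hlt : key x < b
      · rw [if_pos hlt, if_pos hlt, if_pos ⟨by simpa using hq.1.2, hq.2⟩]
        exact ih x (key x) (le_of_lt (lt_of_lt_of_le hlt hb))
      · rw [if_neg hlt, if_neg hlt]; exact ih v b hb
    · simp only [List.foldl_cons, List.filter_cons, if_neg hq]
      by_cases hlt : key x < b
      · rw [if_pos hlt]
        have h999 : key x < 999999 := lt_of_lt_of_le hlt hb
        have hcond : ¬ (¬ (vis.contains x = true) ∧ key x ≠ 0) := by
          intro ⟨h1, h2⟩
          exact hq (by
            simp only [Bool.and_eq_true, Bool.not_eq_true', decide_eq_true_eq]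
            exact ⟨⟨h999, by simpa using h1⟩, h2⟩)
        rw [if_neg hcond]; exact ih v b hb
      · rw [if_neg hlt]; exact ih v b hb

-- The strict-min selection over a candidate list tracks (runner, key runner).
theorem fold2_eq_minf (key : Int → Int) :
    ∀ (l : List Int) (v : Int),
    l.foldl (fun (s : Int × Int) y => if key y < s.2 then (y, key y) else s) (v, key v)
    = (l.foldl (fun m y => if key y < key m then y else m) v,
       key (l.foldl (fun m y => if key y < key m then y else m) v)) := by
  intro l
  induction l with
  | nil => intro v; rfl
  | cons y t ih =>
    intro v
    simp only [List.foldl_cons]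
    by_cases h : key y < key v
    · rw [if_pos h, if_pos h]; exact ih y
    · rw [if_neg h, if_neg h]; exact ih v

-- Head of the stable insertion sort = first strict minimum (running-min fold).
theorem head_foldl_insertBy (key : Int → Int) :
    ∀ (l : List Int) (h : Int) (t : List Int),
    (l.foldl (fun acc x => PySem.List.insertBy (fun a b => decide (key a < key b)) x acc) (h :: t)).head?
    = some (l.foldl (fun m y => if key y < key m then y else m) h) := by
  intro l
  induction l with
  | nil => intro h t; rfl
  | cons y c ih =>
    intro h t
    simp only [List.foldl_cons]
    by_cases hlt : key y < key h
    · have : PySem.List.insertBy (fun a b => decide (key a < key b)) y (h :: t) = y :: h :: t := by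
        simp [PySem.List.insertBy, hlt]
      rw [this, if_pos hlt]; exact ih y (h :: t)
    · have : PySem.List.insertBy (fun a b => decide (key a < key b)) y (h :: t)
        = h :: PySem.List.insertBy (fun a b => decide (key a < key b)) y t := by
        simp [PySem.List.insertBy, hlt]
      rw [this, if_neg hlt]; exact ih h _

-- ===== VERDICT (by name: the statement is the Claim_ definition above) =====
theorem searchForBestOption_spec : Claim_equal_searchForBestOption := by
  intro actualIndex row alreadyVisited distanceMatrix _
  unfold Spec_searchForBestOption searchForBestOption searchForBestOption_alt
  rw [foldA_eq_foldl_filter (fun x => PySem.List.pyGetD row x 0) alreadyVisited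
        (PySem.List.pyRange 0 (PySem.List.len row) 1) (-1) 999999 le_rfl]
  rw [PySem.List.sorted_eq_foldl_insertBy]
  generalize hg : (PySem.List.pyRange 0 (PySem.List.len row) 1).filter
      (fun x => decide (PySem.List.pyGetD row x 0 < 999999) &&
                !(alreadyVisited.contains x) &&
                decide (PySem.List.pyGetD row x 0 ≠ 0)) = cand
  match hcc : cand with
  | [] => rfl
  | y :: ys =>
    have hy999 : PySem.List.pyGetD row y 0 < 999999 := by
      have hy : y ∈ (PySem.List.pyRange 0 (PySem.List.len row) 1).filter
          (fun x => decide (PySem.List.pyGetD row x 0 < 999999) &&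
                    !(alreadyVisited.contains x) &&
                    decide (PySem.List.pyGetD row x 0 ≠ 0)) := by
        rw [hg]; simp
      have := List.of_mem_filter hy
      simp only [Bool.and_eq_true, decide_eq_true_eq] at this
      exact this.1.1
    simp only [List.foldl_cons]
    rw [if_pos hy999, fold2_eq_minf (fun x => PySem.List.pyGetD row x 0) ys y]
    have hh := head_foldl_insertBy (fun x => PySem.List.pyGetD row x 0) ys y []
    cases hs : ys.foldl (fun acc x => PySem.List.insertBy
        (fun a b => decide (PySem.List.pyGetD row a 0 < PySem.List.pyGetD row b 0)) x acc)
        (PySem.List.insertBy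
          (fun a b => decide (PySem.List.pyGetD row a 0 < PySem.List.pyGetD row b 0)) y []) with
    | nil =>
      rw [show PySem.List.insertBy
          (fun a b => decide (PySem.List.pyGetD row a 0 < PySem.List.pyGetD row b 0)) y []
          = [y] from rfl] at hs
      rw [hs] at hh
      simp at hh
    | cons m rest =>
      rw [show PySem.List.insertBy
          (fun a b => decide (PySem.List.pyGetD row a 0 < PySem.List.pyGetD row b 0)) y []
          = [y] from rfl] at hs
      rw [hs] at hh
      simp only [List.head?_cons, Option.some.injEq] at hh
      simp [hh]
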